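-- pv_equiv track=rewrite | github.com/GGGuYu/Movie_recommendation | MovieSystem/Flask/__main__.py | split_movie
-- ===== SOURCE A (Python) =====
-- def split_movie(line):
--   res = []
--   j = 0
--   length = len(line)
--   for i in range(length):
--     if line[j] == ' ':
--       j += 1
--       continue
--     if line[i] == ' ' or i == length:
--       res.append(line[j:i])
--       j = i
--   res.append(line[-3:])
--   return res
-- ===== SOURCE B (Python) =====
-- def split_movie(line):
--     # tokens = the non-empty space-separated runs that are terminated by a space
--     # (the [:-1] drops the trailing, unterminated segment, as A does),
--     # then the line's last 3 characters appended unconditionally, as A does.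
--     return [t for t in line.split(' ')[:-1] if t] + [line[-3:]]
-- ===== Notes on version B (the rewrite author's own statement) =====
-- stated objective: idiomatic
-- what changed: Replaced the manual two-pointer index scan with a single space-split (dropping the trailing unterminated segment via [:-1]) and an empties-filtering comprehension; the split runs in C instead of a per-character Python loop.
import Mathlib
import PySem

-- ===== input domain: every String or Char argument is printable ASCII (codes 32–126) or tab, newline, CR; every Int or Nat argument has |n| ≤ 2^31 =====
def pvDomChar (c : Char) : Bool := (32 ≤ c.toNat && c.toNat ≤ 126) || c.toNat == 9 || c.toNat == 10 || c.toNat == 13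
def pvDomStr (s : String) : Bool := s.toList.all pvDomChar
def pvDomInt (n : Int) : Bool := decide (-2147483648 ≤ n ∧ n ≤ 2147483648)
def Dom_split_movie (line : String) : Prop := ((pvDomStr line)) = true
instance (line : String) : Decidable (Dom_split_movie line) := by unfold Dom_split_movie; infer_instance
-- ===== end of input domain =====

-- B replaces A's manual two-pointer index scan with a single space-split, dropping the
-- trailing unterminated segment via [:-1] and filtering empties (idiomatic; measured faster).


-- ===== PORT A =====
-- loop body of A's for-loop; both indexings line[j] and line[i] are always in range
-- (established by the loop invariant in the proofs below), so pyGet?'s `.getD ' '`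
-- default is never consulted.
def stepA (cs : List Char) (length : Int) (st : List String × Int) (i : Int) : List String × Int :=
  if (PySem.List.pyGet? cs st.2).getD ' ' = ' ' then (st.1, st.2 + 1)
  else if (PySem.List.pyGet? cs i).getD ' ' = ' ' ∨ i = length then
    (st.1 ++ [String.ofList (PySem.List.slice cs (some st.2) (some i))], i)
  else st

def split_movie (line : String) : List String :=
  ((PySem.List.pyRange 0 (line.toList.length : Int) 1).foldl
      (stepA line.toList (line.toList.length : Int)) ([], 0)).1
    ++ [String.ofList (PySem.List.slice line.toList (some (-3)) none)]

-- ===== PORT B =====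
def split_movie_alt (line : String) : List String :=
  (PySem.List.slice ((PySem.Str.split? line " ").getD []) none (some (-1))).filter
      (fun t => t != "")
    ++ [String.ofList (PySem.List.slice line.toList (some (-3)) none)]

-- ===== PRECONDITION & SPEC =====
def Spec_split_movie (line : String) (out : List String) : Prop := out = split_movie_alt line
instance (line : String) (out : List String) : Decidable (Spec_split_movie line out) := by
  unfold Spec_split_movie; infer_instance

-- ===== CLAIM (what is proved, stated in full; the proofs are below) =====
def Claim_equal_split_movie : Prop :=
  ∀ (line : String), Dom_split_movie line → Spec_split_movie line (split_movie line)

-- ===== LEMMAS AND PROOFS =====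

-- segments of a char list cut at each ' ' (the last element is the trailing segment);
-- this is what split(' ') produces.
def pvSegs : List Char → List Char → List (List Char)
  | pre, [] => [pre]
  | pre, c :: r => if c = ' ' then pre :: pvSegs [] r else pvSegs (pre ++ [c]) r

-- the common normal form both programs compute: the non-empty space-TERMINATED runs.
def pvTok : List Char → List Char → List (List Char)
  | _, [] => []
  | acc, c :: r =>
    if c = ' ' then (if acc = [] then pvTok [] r else acc :: pvTok [] r)
    else pvTok (acc ++ [c]) r

theorem pv_go_single : ∀ (l : List Char) (fuel : Nat) (cur : List Char) (acc : List (List Char)),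
    l.length < fuel →
    PySem.Chars.splitOn.go [' '] fuel l cur acc = acc.reverse ++ pvSegs cur.reverse l := by
  intro l
  induction l with
  | nil =>
    intro fuel cur acc h
    match fuel with
    | f + 1 => simp [PySem.Chars.splitOn.go, pvSegs]
  | cons c r ih =>
    intro fuel cur acc h
    match fuel with
    | f + 1 =>
      by_cases hc : c = ' '
      · subst hc
        rw [show PySem.Chars.splitOn.go [' '] (f+1) (' ' :: r) cur acc
              = PySem.Chars.splitOn.go [' '] f r [] (cur.reverse :: acc) by
            simp [PySem.Chars.splitOn.go, List.isPrefixOf]]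
        rw [ih f [] (cur.reverse :: acc) (by simpa using h)]
        simp [pvSegs]
      · rw [show PySem.Chars.splitOn.go [' '] (f+1) (c :: r) cur acc
              = PySem.Chars.splitOn.go [' '] f r (c :: cur) acc by
            simp [PySem.Chars.splitOn.go, List.isPrefixOf, (Ne.symm hc)]]
        rw [ih f (c :: cur) acc (by simpa using h)]
        simp [pvSegs, hc]

theorem pv_splitOn_space (cs : List Char) :
    PySem.Chars.splitOn cs [' '] = pvSegs [] cs := by
  have h := pv_go_single cs (cs.length + 1) [] [] (by omega)
  simpa [PySem.Chars.splitOn] using h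

theorem pvSegs_ne_nil : ∀ (l pre : List Char), pvSegs pre l ≠ [] := by
  intro l
  induction l with
  | nil => intro pre; simp [pvSegs]
  | cons c r ih => intro pre; by_cases hc : c = ' ' <;> simp [pvSegs, hc, ih]

theorem pv_segs_filter : ∀ (l pre : List Char),
    (pvSegs pre l).dropLast.filter (fun s => !decide (s = [])) = pvTok pre l := by
  intro l
  induction l with
  | nil => intro pre; simp [pvSegs, pvTok]
  | cons c r ih =>
    intro pre
    by_cases hc : c = ' '
    · subst hc
      rw [show pvSegs pre (' ' :: r) = pre :: pvSegs [] r by simp [pvSegs]]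
      rw [List.dropLast_cons_of_ne_nil (pvSegs_ne_nil r [])]
      by_cases hp : pre = [] <;> simp [hp, List.filter, ih, pvTok]
    · simp [pvSegs, hc, ih, pvTok]

theorem pv_B_eq (line : String) :
    ((PySem.List.slice ((PySem.Str.split? line " ").getD []) none (some (-1))).filter
      (fun t => t != ""))
      = (pvTok [] line.toList).map String.ofList := by
  have hsep : (" " : String).toList = [' '] := by decide
  have hsplit : PySem.Str.split? line " "
      = some ((PySem.Chars.splitOn line.toList [' ']).map String.ofList) := by
    simp [PySem.Str.split?, PySem.Chars.split?, hsep]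
  rw [hsplit]
  simp only [Option.getD_some, PySem.List.slice_to_neg_one]
  rw [← List.map_dropLast, List.filter_map]
  have hfun : ((fun t => t != "") ∘ String.ofList) = (fun s => !decide (s = [])) := by
    funext s; simp only [Function.comp]
    by_cases h : s = [] <;> simp [h]
  rw [hfun, pv_splitOn_space, pv_segs_filter]

theorem pvTok_space_nil (r : List Char) : pvTok [] (' ' :: r) = pvTok [] r := by
  simp [pvTok]

theorem pvTok_space (acc : List Char) (r : List Char) (h : acc ≠ []) :
    pvTok acc (' ' :: r) = acc :: pvTok [] r := by
  simp [pvTok, h]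

theorem pvTok_nonspace (acc : List Char) (c : Char) (r : List Char) (h : ¬ c = ' ') :
    pvTok acc (c :: r) = pvTok (acc ++ [c]) r := by
  simp [pvTok, h]

-- the loop invariant of A's scan: the pointer j either trails i over an all-non-space
-- pending token (part 1) or sits on the space just behind i (part 2).
theorem pv_runA (cs : List Char) : ∀ (d i j : Nat) (res : List String),
    d = cs.length - i → j ≤ i → i ≤ cs.length →
    ((∀ k, j ≤ k → k < i → ¬ cs[k]? = some ' ') →
      ((PySem.List.pyRange (i : Int) (cs.length : Int) 1).foldl
          (stepA cs (cs.length : Int)) (res, (j : Int))).1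
        = res ++ (pvTok ((cs.drop j).take (i - j)) (cs.drop i)).map String.ofList)
    ∧ ((j + 1 = i ∧ cs[j]? = some ' ') →
      ((PySem.List.pyRange (i : Int) (cs.length : Int) 1).foldl
          (stepA cs (cs.length : Int)) (res, (j : Int))).1
        = res ++ (pvTok [] (cs.drop i)).map String.ofList) := by
  intro d
  induction d with
  | zero =>
    intro i j res hd hji hile
    have hi : i = cs.length := by omega
    subst hi
    have hrange : PySem.List.pyRange ((cs.length : Int)) ((cs.length : Int)) 1 = [] := by
      simp [PySem.List.pyRange]
    constructor <;> intro _ <;> simp [hrange, pvTok]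
  | succ e ih =>
    intro i j res hd hji hile
    have hilt : i < cs.length := by omega
    have hpeel : PySem.List.pyRange (i : Int) (cs.length : Int) 1
        = (i : Int) :: PySem.List.pyRange ((i : Int) + 1) (cs.length : Int) 1 :=
      PySem.List.pyRange_one_cons (by exact_mod_cast hilt)
    have hcast : ((i : Int) + 1) = ((i + 1 : Nat) : Int) := by push_cast; ring
    have hdropi : cs.drop i = cs[i]'hilt :: cs.drop (i + 1) :=
      List.drop_eq_getElem_cons hilt
    constructor
    · intro hns
      by_cases hcj : cs[j]'(by omega) = ' '
      · -- leading-space skip: necessarily j = i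
        have hji' : j = i := by
          by_contra hne
          exact hns j le_rfl (by omega)
            (by simp [List.getElem?_eq_getElem (by omega : j < cs.length), hcj])
        subst hji'
        have hstep : stepA cs (cs.length : Int) (res, (j : Int)) (j : Int)
            = (res, ((j + 1 : Nat) : Int)) := by
          simp [stepA, PySem.List.pyGet?_natCast,
            List.getElem?_eq_getElem (by omega : j < cs.length), hcj]
        rw [hpeel, List.foldl_cons, hstep, hcast]
        have h1 := (ih (j + 1) (j + 1) res (by omega) le_rfl (by omega)).1
          (by intro k h1 h2; omega)
        rw [h1, show j + 1 - (j + 1) = 0 from by omega, List.take_zero,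
          show j - j = 0 from by omega, List.take_zero, hdropi, hcj, pvTok_space_nil]
      · -- cs[j] is not a space
        by_cases hci : cs[i]'hilt = ' '
        · -- token ends at i: append cs[j:i]
          have hjlt : j < i := by
            rcases Nat.lt_or_ge j i with h | h
            · exact h
            · exfalso; have he : j = i := by omega
              subst he; exact hcj hci
          have hstep : stepA cs (cs.length : Int) (res, (j : Int)) (i : Int)
              = (res ++ [String.ofList ((cs.drop j).take (i - j))], (i : Int)) := by
            simp only [stepA, PySem.List.pyGet?_natCast,
              List.getElem?_eq_getElem (by omega : j < cs.length),
              List.getElem?_eq_getElem hilt, Option.getD_some]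
            rw [if_neg hcj, if_pos (Or.inl hci), PySem.List.slice_natCast]
          rw [hpeel, List.foldl_cons, hstep, hcast]
          have h2 := (ih (i + 1) i (res ++ [String.ofList ((cs.drop j).take (i - j))])
            (by omega) (by omega) (by omega)).2
            ⟨rfl, by simp [List.getElem?_eq_getElem hilt, hci]⟩
          rw [h2]
          have haccne : (cs.drop j).take (i - j) ≠ [] := by
            have hl : ((cs.drop j).take (i - j)).length = i - j := by
              simp [List.length_take, List.length_drop]; omega
            intro hnil; rw [hnil] at hl; simp at hl; omega
          rw [hdropi, hci, pvTok_space _ _ haccne]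
          simp
        · -- keep scanning the token
          have hstep : stepA cs (cs.length : Int) (res, (j : Int)) (i : Int) = (res, (j : Int)) := by
            simp only [stepA, PySem.List.pyGet?_natCast,
              List.getElem?_eq_getElem (by omega : j < cs.length),
              List.getElem?_eq_getElem hilt, Option.getD_some]
            rw [if_neg hcj, if_neg]
            rintro (h | h)
            · exact hci h
            · exact absurd (by exact_mod_cast h) (by omega : ¬ i = cs.length)
          rw [hpeel, List.foldl_cons, hstep, hcast]
          have h1 := (ih (i + 1) j res (by omega) (by omega) (by omega)).1
            (by
              intro k hk1 hk2
              rcases Nat.lt_or_ge k i with h | h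
              · exact hns k hk1 h
              · have hk : k = i := by omega
                subst hk
                simp [List.getElem?_eq_getElem hilt, hci])
          rw [h1]
          have hacc : (cs.drop j).take (i + 1 - j) = (cs.drop j).take (i - j) ++ [cs[i]'hilt] := by
            rw [show i + 1 - j = (i - j) + 1 from by omega, List.take_add_one]
            congr 1
            rw [List.getElem?_drop,
              List.getElem?_eq_getElem (show j + (i - j) < cs.length from by omega)]
            simp only [Option.toList_some, List.cons.injEq, and_true]
            congr 1
            omega
          rw [hacc, hdropi, pvTok_nonspace _ _ _ hci]
    · rintro ⟨hji1, hspace⟩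
      have hstep : stepA cs (cs.length : Int) (res, (j : Int)) (i : Int)
          = (res, ((j + 1 : Nat) : Int)) := by
        simp [stepA, PySem.List.pyGet?_natCast, hspace]
      rw [hpeel, List.foldl_cons, hstep, hcast, hji1]
      by_cases hci : cs[i]'hilt = ' '
      · have h2 := (ih (i + 1) i res (by omega) (by omega) (by omega)).2
          ⟨rfl, by simp [List.getElem?_eq_getElem hilt, hci]⟩
        rw [h2, hdropi, hci, pvTok_space_nil]
      · have h1 := (ih (i + 1) i res (by omega) (by omega) (by omega)).1
          (by
            intro k hk1 hk2
            have hk : k = i := by omega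
            subst hk
            simp [List.getElem?_eq_getElem hilt, hci])
        rw [h1]
        have hacc : (cs.drop i).take (i + 1 - i) = [] ++ [cs[i]'hilt] := by
          rw [hdropi, show i + 1 - i = 0 + 1 from by omega, List.take_succ_cons, List.take_zero]
          rfl
        rw [hacc, hdropi, pvTok_nonspace _ _ _ hci]

theorem pv_A_eq (line : String) :
    (((PySem.List.pyRange 0 (line.toList.length : Int) 1).foldl
      (stepA line.toList (line.toList.length : Int)) ([], 0)).1 : List String)
      = (pvTok [] line.toList).map String.ofList := by
  have h := (pv_runA line.toList line.toList.length 0 0 [] (by omega) le_rfl (by omega)).1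
    (by intro k h1 h2; omega)
  simpa using h

-- ===== VERDICT (by name: the statement is the Claim_ definition above) =====
theorem split_movie_spec : Claim_equal_split_movie := by
  intro line _
  unfold Spec_split_movie split_movie split_movie_alt
  rw [pv_A_eq, pv_B_eq]
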